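-- pv_equiv track=rewrite | github.com/salargtb/task_vrptw_2024 | LA_Discretization/util_LA.py | calculate_a_w_star_k
-- ===== SOURCE A (Python) =====
-- def calculate_a_w_star_k(u, k, w, routes_for_u, neighbor_list_u):
--     """
--     Computes a_{w*r}^k for a SINGLE (u, k, w) across all route tuples in routes_for_u.
--
--     Each route in routes_for_u is a tuple, e.g. (2, 4, 10, 13).
--
--     Returns a dict: route_tuple -> {0 or 1}, i.e. a_{w*r}^k for that route.
--
--     Based on:
--       a_{w*r}^k = 1 if
--          (partial route up to w is in N_u^{k+}) AND
--          ( w is final in the route  OR  sum_{v not in (N_u^k - {w})} [w immediately precedes v] >= 1 )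
--       else 0.
--     """
--
--     # 1) Build the sets N_u^k and N_u^{k+}
--     # neighbor_list_u is the sorted list of neighbors for u
--     N_k = neighbor_list_u[:k]         # the first k neighbors
--     N_k_plus = set(N_k) | {u}
--     excluded = set(N_k) - {w}         # we'll use this to check "v not in (N_u^k - {w})"
--
--     # Helper: Check if partial route up to w is in N_k_plus
--     def partial_route_in_set(route_tuple, w, valid_set):
--         """
--         Returns True if from the start of route_tuple up to (including) w,
--         all visited nodes are in valid_set.
--         """
--         if w not in route_tuple:
--             return False
--         idx = route_tuple.index(w)
--         for node in route_tuple[:idx+1]: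
--             if node not in valid_set:
--                 return False
--         return True
--
--     # Helper: Check if w is final in route_tuple
--     def w_is_final(route_tuple, w):
--         """
--         Returns True if w is the last node in route_tuple.
--         """
--         if len(route_tuple) == 0:
--             return False
--         return (route_tuple[-1] == w)
--
--     # Helper: a_{w,v,r} = 1 if w immediately precedes v in route_tuple
--     def w_immediately_precedes_v(route_tuple, w, v):
--         """
--         Returns True if in route_tuple, w is directly followed by v.
--         """
--         if w not in route_tuple:
--             return False
--         idx = route_tuple.index(w)
--         # w precedes v if v is at index idx+1
--         if idx < len(route_tuple) - 1 and route_tuple[idx+1] == v: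
--             return True
--         return False
--
--     # 2) We'll store results in a dictionary: route_tuple -> 0/1
--     a_w_star_k_for_routes = {}
--
--     # 3) Iterate over each route (tuple) in routes_for_u
--     for route_tuple in routes_for_u:
--         # (a) Check if partial route up to w is valid
--         a_wrk = 1 if partial_route_in_set(route_tuple, w, N_k_plus) else 0
--         if a_wrk == 0:
--             # If partial route up to w fails, then a_{w*r}^k=0
--             a_w_star_k_for_routes[route_tuple] = 0
--             continue
--
--         # (b) Check if w is final
--         if w_is_final(route_tuple, w):
--             # Then condition is satisfied => a_{w*r}^k=1
--             a_w_star_k_for_routes[route_tuple] = 1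
--             continue
--
--         # (c) Otherwise, we compute sum_{v not in (N_u^k - {w})} a_{w,v,r}
--         # That means sum over all v in route_tuple's successors except those in "excluded".
--         # We'll check if at least one successor v is outside excluded.
--         sum_outside = 0
--         # Let's find all possible v that could follow w
--         # A quick way is to check every node in route_tuple after w's index, but let's do:
--         for v in route_tuple:
--             if v not in excluded:  # i.e. v not in (N_k - {w})
--                 # check adjacency
--                 if w_immediately_precedes_v(route_tuple, w, v):
--                     sum_outside += 1
--
--         if sum_outside >= 1:
--             a_w_star_k_for_routes[route_tuple] = 1
--         else:
--             a_w_star_k_for_routes[route_tuple] = 0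
--
--     # 4) Return the dictionary keyed by route_tuple
--     return a_w_star_k_for_routes
-- ===== SOURCE B (Python) =====
-- def calculate_a_w_star_k(u, k, w, routes_for_u, neighbor_list_u):
--     # Locate w once per route, check its prefix, then look only at the last
--     # node and w's direct successor -- no inner rescan of the route.
--     N_k = neighbor_list_u[:k]
--     valid = set(N_k) | {u}
--     excluded = set(N_k) - {w}
--     result = {}
--     for route in routes_for_u:
--         val = 0
--         if w in route:
--             idx = route.index(w)
--             if all(x in valid for x in route[:idx + 1]):
--                 if route[-1] == w or route[idx + 1] not in excluded:
--                     val = 1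
--         result[route] = val
--     return result
-- ===== Notes on version B (the rewrite author's own statement) =====
-- stated objective: simpler
-- what changed: B locates w once per route and decides the indicator from the prefix check plus the single direct successor route[idx+1], replacing A's three helper functions and its inner loop that rescans the whole route (with a repeated list.index) for every candidate v.
import Mathlib
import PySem

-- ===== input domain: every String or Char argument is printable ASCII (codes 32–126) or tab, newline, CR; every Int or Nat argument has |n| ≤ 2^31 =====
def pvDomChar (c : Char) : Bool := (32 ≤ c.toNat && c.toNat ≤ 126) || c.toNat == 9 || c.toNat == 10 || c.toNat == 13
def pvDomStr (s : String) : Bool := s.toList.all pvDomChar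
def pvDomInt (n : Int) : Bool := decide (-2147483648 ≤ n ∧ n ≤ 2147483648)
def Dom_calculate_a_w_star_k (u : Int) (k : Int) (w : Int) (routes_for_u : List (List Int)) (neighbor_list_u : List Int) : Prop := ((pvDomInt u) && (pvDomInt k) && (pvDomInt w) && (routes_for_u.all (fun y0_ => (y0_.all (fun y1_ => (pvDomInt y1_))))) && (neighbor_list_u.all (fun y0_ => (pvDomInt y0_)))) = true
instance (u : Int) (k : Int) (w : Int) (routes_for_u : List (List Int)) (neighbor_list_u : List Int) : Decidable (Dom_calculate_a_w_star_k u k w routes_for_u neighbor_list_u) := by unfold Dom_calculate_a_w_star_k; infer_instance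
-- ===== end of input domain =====

-- B replaces A's inner rescan (a loop over every v with repeated list.index) by a single
-- check of w's direct successor route[idx+1]; objective: simpler (no helper zoo, one pass per route).

-- ===== PORT A =====
-- helper partial_route_in_set
def pvA_partial_route_in_set (route_tuple : List Int) (w : Int) (valid_set : PySem.Set Int) : Bool :=
  if w ∉ route_tuple then false
  else
    let idx := (PySem.List.index? route_tuple w).getD 0
    (PySem.List.slice route_tuple none (some ((idx : Int) + 1))).all
      (fun node => PySem.Set.contains valid_set node)

-- helper w_is_final
def pvA_w_is_final (route_tuple : List Int) (w : Int) : Bool :=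
  if route_tuple.length = 0 then false
  else PySem.List.pyGetD route_tuple (-1) 0 == w

-- helper w_immediately_precedes_v
def pvA_w_immediately_precedes_v (route_tuple : List Int) (w : Int) (v : Int) : Bool :=
  if w ∉ route_tuple then false
  else
    let idx := (PySem.List.index? route_tuple w).getD 0
    if (idx : Int) < (route_tuple.length : Int) - 1 ∧
        PySem.List.pyGetD route_tuple ((idx : Int) + 1) 0 = v then true
    else false

-- the body of A's `for route_tuple in routes_for_u` loop
def pvA_route_step (w : Int) (N_k_plus excluded : PySem.Set Int)
    (d : PySem.Dict (List Int) Int) (route_tuple : List Int) : PySem.Dict (List Int) Int :=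
  let a_wrk : Int := if pvA_partial_route_in_set route_tuple w N_k_plus then 1 else 0
  if a_wrk = 0 then d.insert route_tuple 0
  else if pvA_w_is_final route_tuple w then d.insert route_tuple 1
  else
    let sum_outside : Int := route_tuple.foldl (fun s v =>
      if PySem.Set.contains excluded v = false then
        (if pvA_w_immediately_precedes_v route_tuple w v then s + 1 else s)
      else s) 0
    if sum_outside ≥ 1 then d.insert route_tuple 1 else d.insert route_tuple 0

def calculate_a_w_star_k (u : Int) (k : Int) (w : Int) (routes_for_u : List (List Int)) (neighbor_list_u : List Int) : List (List Int × Int) :=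
  let N_k := PySem.List.slice neighbor_list_u none (some k)
  let N_k_plus := PySem.Set.union (PySem.Set.ofList N_k) [u]
  let excluded := PySem.Set.diff (PySem.Set.ofList N_k) [w]
  (routes_for_u.foldl (pvA_route_step w N_k_plus excluded) PySem.Dict.empty).items

-- ===== PORT B =====
-- the body of B's `for route in routes_for_u` loop
def pvB_route_step (w : Int) (valid excluded : PySem.Set Int)
    (d : PySem.Dict (List Int) Int) (route : List Int) : PySem.Dict (List Int) Int :=
  let val : Int :=
    match PySem.List.index? route w with
    | none => 0
    | some idx =>
      if (PySem.List.slice route none (some ((idx : Int) + 1))).all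
          (fun x => PySem.Set.contains valid x) then
        if (PySem.List.pyGetD route (-1) 0 == w)
            || !(PySem.Set.contains excluded (PySem.List.pyGetD route ((idx : Int) + 1) 0)) then 1
        else 0
      else 0
  d.insert route val

def calculate_a_w_star_k_alt (u : Int) (k : Int) (w : Int) (routes_for_u : List (List Int)) (neighbor_list_u : List Int) : List (List Int × Int) :=
  let N_k := PySem.List.slice neighbor_list_u none (some k)
  let valid := PySem.Set.union (PySem.Set.ofList N_k) [u]
  let excluded := PySem.Set.diff (PySem.Set.ofList N_k) [w]
  (routes_for_u.foldl (pvB_route_step w valid excluded) PySem.Dict.empty).items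

-- ===== PRECONDITION & SPEC =====
def Spec_calculate_a_w_star_k (u : Int) (k : Int) (w : Int) (routes_for_u : List (List Int)) (neighbor_list_u : List Int) (out : List (List Int × Int)) : Prop := out = calculate_a_w_star_k_alt u k w routes_for_u neighbor_list_u
instance (u : Int) (k : Int) (w : Int) (routes_for_u : List (List Int)) (neighbor_list_u : List Int) (out : List (List Int × Int)) : Decidable (Spec_calculate_a_w_star_k u k w routes_for_u neighbor_list_u out) := by unfold Spec_calculate_a_w_star_k; infer_instance

-- ===== CLAIM (what is proved, stated in full; the proofs are below) =====
def Claim_equal_calculate_a_w_star_k : Prop := ∀ (u : Int) (k : Int) (w : Int) (routes_for_u : List (List Int)) (neighbor_list_u : List Int), Dom_calculate_a_w_star_k u k w routes_for_u neighbor_list_u → Spec_calculate_a_w_star_k u k w routes_for_u neighbor_list_u (calculate_a_w_star_k u k w routes_for_u neighbor_list_u)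

-- ===== LEMMAS AND PROOFS =====

-- A's inner `for v in route_tuple` loop is a 0/1 count of the v with
-- `v not in excluded` and `w immediately precedes v`
lemma pv_foldl_succ_count (E : PySem.Set Int) (t : Int) : ∀ (l : List Int) (a : Int),
    List.foldl (fun s v => if PySem.Set.contains E v = false then
      (if (if t = v then true else false) = true then s + 1 else s) else s) a l
    = a + ((l.countP fun v => !PySem.Set.contains E v && decide (t = v) : Nat) : Int) := by
  intro l
  induction l with
  | nil => intro a; simp
  | cons v l ih =>
      intro a
      simp only [List.foldl_cons, List.countP_cons, ih]
      cases hE : PySem.Set.contains E v <;> by_cases h2 : t = v <;> simp [h2] <;> try ring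

lemma pv_route_step_eq (w : Int) (V E : PySem.Set Int)
    (d : PySem.Dict (List Int) Int) (r : List Int) :
    pvA_route_step w V E d r = pvB_route_step w V E d r := by
  unfold pvA_route_step pvB_route_step
  cases hidx : PySem.List.index? r w with
  | none =>
      have hw : w ∉ r := (PySem.List.index?_eq_none_iff r w).mp hidx
      simp [pvA_partial_route_in_set, hw]
  | some idx =>
      have hw : w ∈ r := by
        rw [← PySem.List.index?_isSome_iff (v := w), hidx]; rfl
      obtain ⟨hk, hkw, _⟩ := PySem.List.getElem_of_index?_eq_some hidx
      simp only [pvA_partial_route_in_set, hw, not_true_eq_false, if_false, hidx,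
        Option.getD_some]
      cases hall : (PySem.List.slice r none (some ((idx : Int) + 1))).all
          (fun node => PySem.Set.contains V node) with
      | false => simp
      | true =>
        have hlen0 : r.length ≠ 0 := by
          intro h; rw [List.length_eq_zero_iff.mp h] at hw; simp at hw
        simp only [pvA_w_is_final, hlen0, if_false]
        cases hlast : (PySem.List.pyGetD r (-1) 0 == w) with
        | true => simp
        | false =>
          simp only [Bool.false_or, pvA_w_immediately_precedes_v]
          have hne : r ≠ [] := by rintro rfl; simp at hw
          have hget : PySem.List.pyGetD r (-1) 0 = r[r.length - 1] :=
            PySem.List.pyGetD_neg_ofNat r 1 0 (by omega) (by omega)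
          have hlastne : r[r.length - 1] ≠ w := by
            intro h; rw [hget, h] at hlast; simp at hlast
          have hlt : idx + 1 < r.length := by
            rcases Nat.lt_or_ge (idx + 1) r.length with h | h
            · exact h
            · exfalso
              have h3 : r[r.length - 1] = w := by
                have he : r.length - 1 = idx := by omega
                simp only [he]; exact hkw
              exact hlastne h3
          have h1 : (idx : Int) < (r.length : Int) - 1 := by omega
          have hsmem : PySem.List.pyGetD r ((idx : Int) + 1) 0 ∈ r := by
            rw [PySem.List.pyGetD_eq_getElem r 0 (by omega) (by omega)]
            exact List.getElem_mem _
          simp only [hw, not_true_eq_false, if_false, hidx, Option.getD_some, h1, true_and]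
          rw [pv_foldl_succ_count]
          cases hEs : PySem.Set.contains E (PySem.List.pyGetD r ((idx : Int) + 1) 0) with
          | true =>
            have hc : (r.countP fun v => !PySem.Set.contains E v &&
                decide (PySem.List.pyGetD r ((idx : Int) + 1) 0 = v)) = 0 := by
              rw [List.countP_eq_zero]
              intro a _ hpa
              simp only [Bool.and_eq_true, Bool.not_eq_true', decide_eq_true_eq] at hpa
              have hEa : PySem.Set.contains E a = true := by rw [← hpa.2]; exact hEs
              rw [hpa.1] at hEa
              exact Bool.false_ne_true hEa
            rw [hc]; norm_num
          | false =>
            have hc : 0 < (r.countP fun v => !PySem.Set.contains E v &&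
                decide (PySem.List.pyGetD r ((idx : Int) + 1) 0 = v)) := by
              rw [List.countP_pos_iff]
              refine ⟨_, hsmem, ?_⟩
              simp only [Bool.and_eq_true, Bool.not_eq_true', decide_eq_true_eq]
              exact ⟨hEs, by simp⟩
            have hge : (1:Int) ≤ 0 + ((r.countP fun v => !PySem.Set.contains E v &&
                decide (PySem.List.pyGetD r ((idx : Int) + 1) 0 = v) : Nat) : Int) := by
              omega
            rw [if_pos hge]; simp

lemma pv_steps_eq (w : Int) (V E : PySem.Set Int) :
    pvA_route_step w V E = pvB_route_step w V E :=
  funext fun d => funext fun r => pv_route_step_eq w V E d r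

-- ===== VERDICT (by name: the statement is the Claim_ definition above) =====
theorem calculate_a_w_star_k_spec : Claim_equal_calculate_a_w_star_k := by
  intro u k w routes_for_u neighbor_list_u _
  unfold Spec_calculate_a_w_star_k calculate_a_w_star_k calculate_a_w_star_k_alt
  simp only [pv_steps_eq]
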